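-- pv_equiv track=rewrite | github.com/ASVLeipzig/cor-asv-fst | ocrd_cor_asv_fst/lib/error_st.py | select_ngrams
-- ===== SOURCE A (Python) =====
-- from operator import itemgetter
--
-- def select_ngrams(counter, num):
--     '''Select all unigrams ant most frequent n-grams of higher orders.'''
--     # select the unigrams
--     ngrams = [key for key in counter.keys() if len(key) <= 1]
--     if len(ngrams) > num:
--         raise Exception('Number of unigrams exceeds the number of allowed'
--                         'n-grams.')
--     # add the most frequent n-grams for n > 1
--     ngrams.extend(map(
--         itemgetter(0),
--         sorted(((key, val) for key, val in counter.items() if len(key) > 1),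
--                reverse=True, key=itemgetter(1))[:num-len(ngrams)]))
--     return ngrams
-- ===== SOURCE B (Python) =====
-- def _insert_desc(top, item):
--     '''Insert item into a descending-by-count list, after all entries whose
--     count is >= item's count (keeps arrival order among equal counts).'''
--     if not top or top[0][1] < item[1]:
--         return [item] + top
--     return [top[0]] + _insert_desc(top[1:], item)
--
--
-- def select_ngrams(counter, num):
--     '''Select all unigrams and most frequent n-grams of higher orders.'''
--     # single streaming pass, no global sort: unigrams go straight to the
--     # result; higher-order n-grams are kept in a bounded buffer holding the
--     # current top candidates in descending count order, truncated as we go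
--     result = []
--     top = []
--     for key, val in counter.items():
--         if len(key) <= 1:
--             result.append(key)
--         else:
--             top = _insert_desc(top, (key, val))
--             if len(top) > num:
--                 top = top[:-1]
--     if len(result) > num:
--         raise Exception('Number of unigrams exceeds the number of allowed'
--                         'n-grams.')
--     result.extend(key for key, _ in top[:num - len(result)])
--     return result
-- ===== Notes on version B (the rewrite author's own statement) =====
-- stated objective: alternative
-- what changed: Replaces the filter + global stable sort + slice pipeline by a single streaming pass that keeps a bounded buffer of at most num top candidates, inserting each higher-order n-gram into its descending-count position and truncating the buffer as it goes, so no full sort of all items is ever built.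
import Mathlib
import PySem

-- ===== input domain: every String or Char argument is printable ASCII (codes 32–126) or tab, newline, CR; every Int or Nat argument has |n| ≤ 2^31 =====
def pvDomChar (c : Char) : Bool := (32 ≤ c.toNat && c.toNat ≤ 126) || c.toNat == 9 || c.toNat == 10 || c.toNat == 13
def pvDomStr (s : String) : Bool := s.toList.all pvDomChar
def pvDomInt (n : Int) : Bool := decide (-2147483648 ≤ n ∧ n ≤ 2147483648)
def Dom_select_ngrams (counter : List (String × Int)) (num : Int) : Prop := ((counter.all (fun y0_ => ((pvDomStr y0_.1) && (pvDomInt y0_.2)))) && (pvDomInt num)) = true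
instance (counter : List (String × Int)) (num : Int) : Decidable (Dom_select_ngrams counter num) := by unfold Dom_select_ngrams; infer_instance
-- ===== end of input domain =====

-- B replaces A's filter + global stable sort + slice pipeline by one streaming pass
-- keeping a bounded buffer of the current top candidates (alternative decomposition,
-- same result on Pre_).


-- ===== PORT A =====
def select_ngrams (counter : List (String × Int)) (num : Int) : List String :=
  let d := PySem.Dict.ofList counter
  let ngrams := d.keys.filter (fun key => PySem.Str.len key ≤ 1)
  -- (the Python raises here when ngrams is longer than num: excluded by Pre_)
  let sortedHigh :=
    PySem.List.sorted (d.items.filter (fun kv => 1 < PySem.Str.len kv.1)) (fun kv => kv.2) true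
  ngrams ++ (PySem.List.slice sortedHigh none (some (num - (ngrams.length : Int)))).map (fun kv => kv.1)

-- ===== PORT B =====
-- port of Source B's _insert_desc (recursive insertion before the first smaller count)
def pvInsDesc : List (String × Int) → (String × Int) → List (String × Int)
  | [], item => [item]
  | y :: t, item => if y.2 < item.2 then item :: y :: t else y :: pvInsDesc t item

def select_ngrams_alt (counter : List (String × Int)) (num : Int) : List String :=
  let d := PySem.Dict.ofList counter
  let st := d.items.foldl
    (fun (st : List String × List (String × Int)) kv =>
      if PySem.Str.len kv.1 ≤ 1 then (st.1 ++ [kv.1], st.2)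
      else
        let top := pvInsDesc st.2 kv
        (st.1, if num < (top.length : Int) then top.dropLast else top))
    ([], [])
  -- (the Python raises here when st.1 is longer than num: excluded by Pre_)
  st.1 ++ (PySem.List.slice st.2 none (some (num - (st.1.length : Int)))).map (fun kv => kv.1)

-- ===== PRECONDITION & SPEC =====
-- Pre_ excludes exactly the inputs on which the Python A raises its explicit
-- Exception: more unigram keys than num allows.
def Pre_select_ngrams (counter : List (String × Int)) (num : Int) : Prop :=
  ((((PySem.Dict.ofList counter).keys.filter (fun key => PySem.Str.len key ≤ 1)).length : Int) ≤ num)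
instance (counter : List (String × Int)) (num : Int) : Decidable (Pre_select_ngrams counter num) := by unfold Pre_select_ngrams; infer_instance

def pvWitness_select_ngrams : (List (String × Int)) × Int :=
  ([("a", 2), ("bc", 5), ("d", 1), ("ef", 3)], 3)

def Spec_select_ngrams (counter : List (String × Int)) (num : Int) (out : List String) : Prop := out = select_ngrams_alt counter num
instance (counter : List (String × Int)) (num : Int) (out : List String) : Decidable (Spec_select_ngrams counter num out) := by unfold Spec_select_ngrams; infer_instance

-- ===== CLAIM (what is proved, stated in full; the proofs are below) =====
def Claim_equal_select_ngrams : Prop := ∀ (counter : List (String × Int)) (num : Int), Dom_select_ngrams counter num → Pre_select_ngrams counter num → Spec_select_ngrams counter num (select_ngrams counter num)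

-- ===== LEMMAS AND PROOFS =====

theorem pvInsDesc_eq (t : List (String × Int)) (x : String × Int) :
    pvInsDesc t x = PySem.List.insertBy (fun a b => decide (b.2 < a.2)) x t := by
  induction t with
  | nil => simp [pvInsDesc, PySem.List.insertBy]
  | cons y ys ih => simp [pvInsDesc, PySem.List.insertBy, ih]

theorem pvInsDesc_length (t : List (String × Int)) (x : String × Int) :
    (pvInsDesc t x).length = t.length + 1 := by
  induction t with
  | nil => simp [pvInsDesc]
  | cons y ys ih =>
    simp only [pvInsDesc]
    split_ifs <;> simp [ih]

theorem pvTakeCons (m : Nat) (y : String × Int) (t : List (String × Int)) :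
    List.take m (y :: List.take m t) = List.take m (y :: t) := by
  cases m with
  | zero => rfl
  | succ k =>
    simp only [List.take_succ_cons, List.take_take]
    rw [Nat.min_eq_left (by omega)]

theorem pvTakeIns (x : String × Int) (l : List (String × Int)) :
    ∀ n : Nat,
      ((PySem.List.insertBy (fun a b => decide (b.2 < a.2)) x (l.take n)).take n)
        = (PySem.List.insertBy (fun a b => decide (b.2 < a.2)) x l).take n := by
  induction l with
  | nil => intro n; simp
  | cons y t ih =>
    intro n
    cases n with
    | zero => simp
    | succ m =>
      rw [← pvInsDesc_eq, ← pvInsDesc_eq]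
      simp only [List.take_succ_cons, pvInsDesc]
      split_ifs with h
      · simp only [List.take_succ_cons]
        exact congrArg (x :: ·) (pvTakeCons m y t)
      · simp only [List.take_succ_cons]
        rw [pvInsDesc_eq, pvInsDesc_eq, ih m]

theorem pvStep (num : Int) (n : Nat) (hn : num = (n : Int))
    (acc : List (String × Int)) (x : String × Int) :
    (let top := pvInsDesc (acc.take n) x;
     if num < (top.length : Int) then top.dropLast else top)
      = (PySem.List.insertBy (fun a b => decide (b.2 < a.2)) x acc).take n := by
  have hlen : (pvInsDesc (acc.take n) x).length = (acc.take n).length + 1 :=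
    pvInsDesc_length _ _
  have hle : (acc.take n).length ≤ n := by simp
  simp only
  split_ifs with h
  · have hl : (pvInsDesc (acc.take n) x).length = n + 1 := by
      rw [hlen]; omega
    rw [List.dropLast_eq_take, hl]
    simp only [Nat.add_sub_cancel]
    rw [pvInsDesc_eq, pvTakeIns]
  · have hl : (pvInsDesc (acc.take n) x).length ≤ n := by omega
    rw [← List.take_of_length_le hl, pvInsDesc_eq, pvTakeIns]

theorem pvFold (num : Int) (n : Nat) (hn : num = (n : Int)) :
    ∀ (l : List (String × Int)) (res : List String) (acc : List (String × Int)),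
    l.foldl
      (fun (st : List String × List (String × Int)) kv =>
        if PySem.Str.len kv.1 ≤ 1 then (st.1 ++ [kv.1], st.2)
        else
          let top := pvInsDesc st.2 kv
          (st.1, if num < (top.length : Int) then top.dropLast else top))
      (res, acc.take n)
    = (res ++ (l.filter (fun kv => PySem.Str.len kv.1 ≤ 1)).map Prod.fst,
       ((l.filter (fun kv => 1 < PySem.Str.len kv.1)).foldl
          (fun t kv => PySem.List.insertBy (fun a b => decide (b.2 < a.2)) kv t) acc).take n) := by
  intro l
  induction l with
  | nil => intro res acc; simp
  | cons kv t ih =>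
    intro res acc
    by_cases h : PySem.Str.len kv.1 ≤ 1
    · have h2 : ¬ 1 < PySem.Str.len kv.1 := by omega
      simp only [List.foldl_cons, List.filter_cons, decide_eq_true_eq, h, if_true,
        decide_eq_false h2]
      rw [ih (res ++ [kv.1]) acc]
      simp
    · have h2 : 1 < PySem.Str.len kv.1 := by omega
      simp only [List.foldl_cons, if_neg h, List.filter_cons, decide_eq_false h, h2,
        decide_eq_true_eq, if_true]
      rw [pvStep num n hn acc kv,
          ih res (PySem.List.insertBy (fun a b => decide (b.2 < a.2)) kv acc)]
      simp

theorem pv_main (counter : List (String × Int)) (num : Int)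
    (hpre : Pre_select_ngrams counter num) :
    select_ngrams counter num = select_ngrams_alt counter num := by
  unfold select_ngrams select_ngrams_alt Pre_select_ngrams at *
  dsimp only
  set items := (PySem.Dict.ofList counter).items with hitems
  set ng := (items.filter (fun kv => PySem.Str.len kv.1 ≤ 1)).map Prod.fst with hng
  have hkeys : (PySem.Dict.ofList counter).keys.filter (fun key => PySem.Str.len key ≤ 1) = ng := by
    show (items.map Prod.fst).filter (fun key => PySem.Str.len key ≤ 1) = ng
    rw [List.filter_map]
    rfl
  rw [hkeys] at hpre ⊢
  have hnum : 0 ≤ num := le_trans (by positivity) hpre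
  have hn : num = ((num.toNat : Nat) : Int) := by omega
  have hinit : ([] : List (String × Int)) = ([] : List (String × Int)).take num.toNat := by simp
  rw [hinit, pvFold num num.toNat hn items [] []]
  simp only [List.nil_append]
  rw [← hng]
  have hsort :
      (items.filter (fun kv => 1 < PySem.Str.len kv.1)).foldl
        (fun t kv => PySem.List.insertBy (fun a b => decide (b.2 < a.2)) kv t) []
      = PySem.List.sorted (items.filter (fun kv => 1 < PySem.Str.len kv.1)) (fun kv => kv.2) true := by
    rw [PySem.List.sorted_rev_eq_foldl_insertBy]
  rw [hsort]
  set S := PySem.List.sorted (items.filter (fun kv => 1 < PySem.Str.len kv.1)) (fun kv => kv.2) true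
  have hj : (0 : Int) ≤ num - (ng.length : Int) := by omega
  rw [PySem.List.slice_to _ hj, PySem.List.slice_to _ hj, List.take_take,
    Nat.min_eq_left (by omega)]

-- ===== VERDICT (by name: the statement is the Claim_ definition above) =====
theorem select_ngrams_spec : Claim_equal_select_ngrams := by
  intro counter num _hdom hpre
  unfold Spec_select_ngrams
  exact pv_main counter num hpre
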